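-- pv_equiv track=rewrite | github.com/MrBrantCode/unitest_baseline | mut_generate/mist_train_cf/cf_63880/solution.py | find_sums
-- ===== SOURCE A (Python) =====
-- def find_sums(nums):
--     # Calculate the sum of individual digits for each integer
--     sums = [sum(map(int, str(num))) if num >= 0 else -sum(map(int, str(abs(num)))) for num in nums]
--
--     # Create a dictionary where the keys are integers and the values are their sums
--     sums_dict = dict(zip(nums, sums))
--
--     # Find the maximum and minimum sums
--     max_sum = max(sums_dict.values())
--     min_sum = min(sums_dict.values())
--
--     # Find the integers with maximum and minimum sums
--     max_nums = [num for num, s in sums_dict.items() if s == max_sum]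
--     min_nums = [num for num, s in sums_dict.items() if s == min_sum]
--
--     return sums_dict, max_nums, min_nums
-- ===== SOURCE B (Python) =====
-- def find_sums(nums):
--     # Digit-sum table built in one pass, then an index from digit-sum to numbers,
--     # so the max/min groups are single lookups instead of two filtering passes.
--     sums_dict = {}
--     for n in nums:
--         s = sum(int(c) for c in str(abs(n)))
--         sums_dict[n] = s if n >= 0 else -s
--
--     groups = {}
--     for n, s in sums_dict.items():
--         groups.setdefault(s, []).append(n)
--
--     max_sum = max(groups)
--     min_sum = min(groups)
--     return sums_dict, groups[max_sum], groups[min_sum]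
-- ===== Notes on version B (the rewrite author's own statement) =====
-- stated objective: alternative
-- what changed: Instead of taking max/min over the dict values and then filtering the dict items twice, B builds a grouping index (digit-sum -> numbers) in one pass over the dict items and returns single lookups at the max and min keys; Pre_ excludes only the empty list, where both raise (max of empty sequence).
import Mathlib
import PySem

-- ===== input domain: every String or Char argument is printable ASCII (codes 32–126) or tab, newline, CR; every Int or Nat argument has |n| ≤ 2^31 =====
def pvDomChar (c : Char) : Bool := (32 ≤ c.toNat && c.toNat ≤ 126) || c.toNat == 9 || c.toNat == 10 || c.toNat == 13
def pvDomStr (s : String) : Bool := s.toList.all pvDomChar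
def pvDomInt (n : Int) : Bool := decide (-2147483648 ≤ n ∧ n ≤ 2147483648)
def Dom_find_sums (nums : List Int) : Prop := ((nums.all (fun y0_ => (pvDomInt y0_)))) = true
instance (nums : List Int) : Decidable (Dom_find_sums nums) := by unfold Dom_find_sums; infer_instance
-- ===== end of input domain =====

-- B replaces A's max/min-over-values plus two filtering passes by a digit-sum -> numbers
-- grouping index built once over the dict items, answered by two lookups (same cost class).

-- int(c) for a single decimal-digit char (exact: str(n) of a nonnegative n is all digits)
def pvDigit (c : Char) : Int := (c.toNat : Int) - 48

-- ===== PORT A =====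
def find_sums (nums : List Int) : (List (Int × Int)) × List Int × List Int :=
  -- sums = [sum(map(int, str(num))) if num >= 0 else -sum(map(int, str(abs(num)))) for num in nums]
  let sums := nums.map (fun num =>
    if num ≥ 0 then ((PySem.Int.toChars num).map pvDigit).sum
    else -(((PySem.Int.toChars |num|).map pvDigit).sum))
  -- sums_dict = dict(zip(nums, sums))
  let sums_dict := (nums.zip sums).foldl (fun d p => d.insert p.1 p.2)
      (PySem.Dict.empty : PySem.Dict Int Int)
  -- max_sum = max(sums_dict.values()); min_sum = min(sums_dict.values())  (raise on empty: Pre_)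
  match PySem.List.max? sums_dict.values id, PySem.List.min? sums_dict.values id with
  | some max_sum, some min_sum =>
      (sums_dict.items,
       (sums_dict.items.filter (fun p => p.2 == max_sum)).map (fun p => p.1),
       (sums_dict.items.filter (fun p => p.2 == min_sum)).map (fun p => p.1))
  | _, _ => ([], [], [])

-- ===== PORT B =====
def pvDigitSum (n : Int) : Int :=
  -- s = sum(int(c) for c in str(abs(n))); s if n >= 0 else -s
  let s := ((PySem.Int.toChars |n|).map pvDigit).sum
  if n ≥ 0 then s else -s

def find_sums_alt (nums : List Int) : (List (Int × Int)) × List Int × List Int :=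
  let sums_dict := nums.foldl (fun d n => d.insert n (pvDigitSum n))
      (PySem.Dict.empty : PySem.Dict Int Int)
  -- groups.setdefault(s, []).append(n) over sums_dict.items()
  let groups := sums_dict.items.foldl (fun d p => d.modify p.2 [] (fun l => l ++ [p.1]))
      (PySem.Dict.empty : PySem.Dict Int (List Int))
  -- max_sum = max(groups); min_sum = min(groups)  (raise on empty: Pre_)
  match PySem.List.max? groups.keys id with
  | none => ([], [], [])
  | some max_sum =>
    match PySem.List.min? groups.keys id with
    | none => ([], [], [])
    | some min_sum => (sums_dict.items, groups.getD max_sum [], groups.getD min_sum [])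

-- ===== PRECONDITION & SPEC =====
-- Pre_ excludes only the empty list, where Python A raises ValueError (max() of an empty sequence).
def Pre_find_sums (nums : List Int) : Prop := nums ≠ []
instance (nums : List Int) : Decidable (Pre_find_sums nums) := by unfold Pre_find_sums; infer_instance
def pvWitness_find_sums : List Int := [12, -7, 30, 12]

def Spec_find_sums (nums : List Int) (out : (List (Int × Int)) × List Int × List Int) : Prop := out = find_sums_alt nums
instance (nums : List Int) (out : (List (Int × Int)) × List Int × List Int) : Decidable (Spec_find_sums nums out) := by unfold Spec_find_sums; infer_instance

-- ===== CLAIM (what is proved, stated in full; the proofs are below) =====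
def Claim_equal_find_sums : Prop := ∀ (nums : List Int), Dom_find_sums nums → Pre_find_sums nums → Spec_find_sums nums (find_sums nums)

-- ===== LEMMAS AND PROOFS =====

-- the two digit-sum expressions agree pointwise
theorem pv_dsum_eq (num : Int) :
    (if num ≥ 0 then ((PySem.Int.toChars num).map pvDigit).sum
     else -(((PySem.Int.toChars |num|).map pvDigit).sum)) = pvDigitSum num := by
  unfold pvDigitSum
  by_cases h : num ≥ 0
  · simp [h, abs_of_nonneg h]
  · simp [h]

-- the two dicts are the same dict
theorem pv_dict_eq (nums : List Int) :
    (nums.zip (nums.map (fun num =>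
        if num ≥ 0 then ((PySem.Int.toChars num).map pvDigit).sum
        else -(((PySem.Int.toChars |num|).map pvDigit).sum)))).foldl
      (fun d p => d.insert p.1 p.2) (PySem.Dict.empty : PySem.Dict Int Int)
    = nums.foldl (fun d n => d.insert n (pvDigitSum n)) PySem.Dict.empty := by
  have hz : ∀ (f : Int → Int), nums.zip (nums.map f) = nums.map (fun x => (x, f x)) := by
    intro f
    induction nums with
    | nil => rfl
    | cons x t ih => simp [ih]
  rw [hz, List.foldl_map]
  simp only [pv_dsum_eq]

-- PySem.List.max?/min? with key id over an Int list depend only on membership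
theorem pv_max?_ext (xs ys : List Int) (hmem : ∀ a : Int, a ∈ xs ↔ a ∈ ys) :
    PySem.List.max? xs id = PySem.List.max? ys id := by
  rcases hx : PySem.List.max? xs id with _ | mx
  · rcases hy : PySem.List.max? ys id with _ | my
    · rfl
    · rw [PySem.List.max?_eq_none_iff] at hx
      have := PySem.List.max?_mem hy
      rw [← hmem] at this
      simp [hx] at this
  · rcases hy : PySem.List.max? ys id with _ | my
    · rw [PySem.List.max?_eq_none_iff] at hy
      have := PySem.List.max?_mem hx
      rw [hmem] at this
      simp [hy] at this
    · have hmx := PySem.List.max?_mem hx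
      have hmy := PySem.List.max?_mem hy
      have h1 : mx ≤ my := by
        have := PySem.List.max?_isMax hy mx ((hmem mx).mp hmx); simpa using this
      have h2 : my ≤ mx := by
        have := PySem.List.max?_isMax hx my ((hmem my).mpr hmy); simpa using this
      simp [le_antisymm h1 h2]

theorem pv_min?_ext (xs ys : List Int) (hmem : ∀ a : Int, a ∈ xs ↔ a ∈ ys) :
    PySem.List.min? xs id = PySem.List.min? ys id := by
  rcases hx : PySem.List.min? xs id with _ | mx
  · rcases hy : PySem.List.min? ys id with _ | my
    · rfl
    · rw [PySem.List.min?_eq_none_iff] at hx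
      have := PySem.List.min?_mem hy
      rw [← hmem] at this
      simp [hx] at this
  · rcases hy : PySem.List.min? ys id with _ | my
    · rw [PySem.List.min?_eq_none_iff] at hy
      have := PySem.List.min?_mem hx
      rw [hmem] at this
      simp [hy] at this
    · have hmx := PySem.List.min?_mem hx
      have hmy := PySem.List.min?_mem hy
      have h1 : my ≤ mx := by
        have := PySem.List.min?_isMin hy mx ((hmem mx).mp hmx); simpa using this
      have h2 : mx ≤ my := by
        have := PySem.List.min?_isMin hx my ((hmem my).mpr hmy); simpa using this
      simp [le_antisymm h2 h1]

-- groups lookup = A's filter-then-project, for any items list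
theorem pv_groups_getD (items : List (Int × Int)) (c : Int) :
    (items.foldl (fun d p => d.modify p.2 [] (fun l => l ++ [p.1]))
      (PySem.Dict.empty : PySem.Dict Int (List Int))).getD c []
    = (items.filter (fun p => p.2 == c)).map (fun p => p.1) := by
  have h : items.foldl (fun d p => d.modify p.2 [] (fun l => l ++ [p.1]))
      (PySem.Dict.empty : PySem.Dict Int (List Int))
      = (items.map Prod.swap).foldl (fun d p => d.modify p.1 [] (fun l => l ++ [p.2]))
        PySem.Dict.empty := by
    rw [List.foldl_map]
    simp
  rw [h, PySem.Dict.getD_foldl_modify_append]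
  simp [List.filter_map, List.map_map, Function.comp_def]

-- ===== VERDICT (by name: the statement is the Claim_ definition above) =====
theorem find_sums_spec : Claim_equal_find_sums := by
  intro nums _ hpre
  unfold Spec_find_sums
  simp only [find_sums, find_sums_alt]
  rw [pv_dict_eq]
  set d := nums.foldl (fun d n => d.insert n (pvDigitSum n))
      (PySem.Dict.empty : PySem.Dict Int Int) with hd
  -- keys of the grouping dict vs values of the sums dict: same membership
  have hkeys : (d.items.foldl (fun dd p => dd.modify p.2 [] (fun l => l ++ [p.1]))
      (PySem.Dict.empty : PySem.Dict Int (List Int))).keys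
      = PySem.Set.update (PySem.Dict.empty : PySem.Dict Int (List Int)).keys (d.items.map (fun p => p.2)) := by
    exact PySem.Dict.keys_foldl_modify_key d.items (fun p => p.2) [] (fun _ p => (fun l => l ++ [p.1])) _
  have hvals : d.values = d.items.map (fun p => p.2) := by
    simp [PySem.Dict.values]
  have hmem : ∀ a : Int, a ∈ d.values ↔
      a ∈ (d.items.foldl (fun dd p => dd.modify p.2 [] (fun l => l ++ [p.1]))
        (PySem.Dict.empty : PySem.Dict Int (List Int))).keys := by
    intro a
    rw [hkeys, hvals]
    constructor
    · intro h; simpa [PySem.Set.update, PySem.Set.ofList] using (PySem.Set.mem_ofList _ a).mpr h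
    · intro h; exact (PySem.Set.mem_ofList _ a).mp (by simpa [PySem.Set.update, PySem.Set.ofList] using h)
  rw [pv_max?_ext d.values _ hmem, pv_min?_ext d.values _ hmem]
  rcases hmax : PySem.List.max? _ id with _ | ms
  · rfl
  · rcases hmin : PySem.List.min? _ id with _ | mn
    · rfl
    · simp [pv_groups_getD]
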